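-- pv_equiv track=rewrite | github.com/GitMonsters/octotetrahedral-agi | arc-puzzle-catalog/re-arc/solves/6773b310/solver.py | transform
-- ===== SOURCE A (Python) =====
-- def transform(input_grid: list[list[int]]) -> list[list[int]]:
--     # Find row and column dividers (all-8 rows/cols)
--     rows = len(input_grid)
--     cols = len(input_grid[0])
--
--     row_divs = [r for r in range(rows) if all(input_grid[r][c] == 8 for c in range(cols))]
--     col_divs = [c for c in range(cols) if all(input_grid[r][c] == 8 for r in range(rows))]
--
--     # Build row/col bands
--     row_bands = []
--     prev = 0
--     for rd in row_divs:
--         row_bands.append((prev, rd))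
--         prev = rd + 1
--     row_bands.append((prev, rows))
--
--     col_bands = []
--     prev = 0
--     for cd in col_divs:
--         col_bands.append((prev, cd))
--         prev = cd + 1
--     col_bands.append((prev, cols))
--
--     output = []
--     for r_start, r_end in row_bands:
--         row = []
--         for c_start, c_end in col_bands:
--             count = sum(
--                 1 for r in range(r_start, r_end) for c in range(c_start, c_end)
--                 if input_grid[r][c] == 6
--             )
--             row.append(1 if count >= 2 else 0)
--         output.append(row)
--     return output
-- ===== SOURCE B (Python) =====
-- def transform(input_grid: list[list[int]]) -> list[list[int]]:
--     rows = len(input_grid)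
--     cols = len(input_grid[0])
--
--     row_divs = [r for r in range(rows) if all(input_grid[r][c] == 8 for c in range(cols))]
--     col_divs = [c for c in range(cols) if all(input_grid[r][c] == 8 for r in range(rows))]
--
--     # scatter pass: bucket every 6-cell into its (row band, col band) cell
--     counts = [[0] * (len(col_divs) + 1) for _ in range(len(row_divs) + 1)]
--     for r in range(rows):
--         for c in range(cols):
--             if input_grid[r][c] == 6:
--                 br = sum(1 for d in row_divs if d < r)
--                 bc = sum(1 for d in col_divs if d < c)
--                 counts[br][bc] += 1
--
--     return [[1 if k >= 2 else 0 for k in row] for row in counts]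
-- ===== Notes on version B (the rewrite author's own statement) =====
-- stated objective: alternative
-- what changed: Replaces A's per-band nested re-scan (build band intervals, then count 6s inside each band rectangle) with a single scatter pass over all cells that buckets each 6 into counts[band(r)][band(c)] and thresholds the counts matrix at the end.
import Mathlib
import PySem

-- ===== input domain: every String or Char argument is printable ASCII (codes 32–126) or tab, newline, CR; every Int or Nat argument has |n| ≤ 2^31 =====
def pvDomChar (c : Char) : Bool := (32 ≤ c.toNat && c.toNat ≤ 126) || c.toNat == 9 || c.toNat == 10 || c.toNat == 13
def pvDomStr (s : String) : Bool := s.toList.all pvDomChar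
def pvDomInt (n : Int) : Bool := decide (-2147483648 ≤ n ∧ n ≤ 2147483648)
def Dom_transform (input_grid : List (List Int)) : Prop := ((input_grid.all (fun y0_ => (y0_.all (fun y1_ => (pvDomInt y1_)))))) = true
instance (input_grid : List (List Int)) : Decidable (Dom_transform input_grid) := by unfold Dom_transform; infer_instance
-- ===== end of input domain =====

-- B replaces A's per-band nested re-scan with one scatter pass bucketing each 6-cell
-- into counts[rowBand][colBand]; equivalence of the return values is proved on Pre_.

-- ===== PORT A =====
-- input_grid[r][c] for the 0 ≤ r < rows, 0 ≤ c ≤ cols indices both programs use;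
-- exact on Pre_transform (indices in range there)
def cell (g : List (List Int)) (r c : Nat) : Int := (g.getD r []).getD c 0

def isDivRow (g : List (List Int)) (cols r : Nat) : Bool :=
  (List.range cols).all (fun c => cell g r c == 8)

def isDivCol (g : List (List Int)) (rows c : Nat) : Bool :=
  (List.range rows).all (fun r => cell g r c == 8)

-- A's band-building loop (append (prev, d); prev = d + 1; finally append (prev, n))
def bandsAux : List Nat → Nat → Nat → List (Nat × Nat)
  | [], prev, n => [(prev, n)]
  | d :: ds, prev, n => (prev, d) :: bandsAux ds (d + 1) n

-- sum(f r for r in range(a, b))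
def sumRange (f : Nat → Nat) (a b : Nat) : Nat := ((List.range' a (b - a)).map f).sum

def transform (input_grid : List (List Int)) : List (List Int) :=
  let rows := input_grid.length
  let cols := (input_grid.headD []).length
  let rowDivs := (List.range rows).filter (fun r => isDivRow input_grid cols r)
  let colDivs := (List.range cols).filter (fun c => isDivCol input_grid rows c)
  let rowBands := bandsAux rowDivs 0 rows
  let colBands := bandsAux colDivs 0 cols
  rowBands.map (fun rb =>
    colBands.map (fun cb =>
      let count := sumRange (fun r =>
        sumRange (fun c => if cell input_grid r c = 6 then 1 else 0) cb.1 cb.2) rb.1 rb.2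
      if 2 ≤ count then (1 : Int) else 0))

-- ===== PORT B =====
-- sum(1 for d in divs if d < x)
def bis (divs : List Nat) (x : Nat) : Nat := divs.countP (fun d => decide (d < x))

-- counts[j] += 1 (in-place list update)
def bump : List Nat → Nat → List Nat
  | [], _ => []
  | x :: xs, 0 => (x + 1) :: xs
  | x :: xs, Nat.succ j => x :: bump xs j

-- counts[i][j] += 1
def bump2 : List (List Nat) → Nat → Nat → List (List Nat)
  | [], _, _ => []
  | row :: m, 0, j => bump row j :: m
  | row :: m, Nat.succ i, j => row :: bump2 m i j

-- body of B's innermost loop: if input_grid[r][c] == 6: counts[br][bc] += 1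
def scatterCell (g : List (List Int)) (rd cd : List Nat) (r : Nat)
    (m : List (List Nat)) (c : Nat) : List (List Nat) :=
  if cell g r c = 6 then bump2 m (bis rd r) (bis cd c) else m

def transform_alt (input_grid : List (List Int)) : List (List Int) :=
  let rows := input_grid.length
  let cols := (input_grid.headD []).length
  let rowDivs := (List.range rows).filter (fun r => isDivRow input_grid cols r)
  let colDivs := (List.range cols).filter (fun c => isDivCol input_grid rows c)
  let init := List.replicate (rowDivs.length + 1) (List.replicate (colDivs.length + 1) 0)
  let counts := (List.range rows).foldl (fun m r =>
    (List.range cols).foldl (scatterCell input_grid rowDivs colDivs r) m) init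
  counts.map (fun row => row.map (fun k => if 2 ≤ k then (1 : Int) else 0))

-- ===== PRECONDITION & SPEC =====
-- Pre_ is exactly where Python A returns: a nonempty grid whose every row has at least
-- len(input_grid[0]) entries (otherwise input_grid[0] / input_grid[r][c] raises IndexError).
def Pre_transform (input_grid : List (List Int)) : Prop :=
  input_grid ≠ [] ∧ ∀ row ∈ input_grid, (input_grid.headD []).length ≤ row.length

instance (input_grid : List (List Int)) : Decidable (Pre_transform input_grid) := by
  unfold Pre_transform; infer_instance

def pvWitness_transform : List (List Int) := [[6, 6, 8], [0, 6, 8]]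

def Spec_transform (input_grid : List (List Int)) (out : List (List Int)) : Prop :=
  out = transform_alt input_grid
instance (input_grid : List (List Int)) (out : List (List Int)) : Decidable (Spec_transform input_grid out) := by
  unfold Spec_transform; infer_instance

-- ===== CLAIM (what is proved, stated in full; the proofs are below) =====
def Claim_equal_transform : Prop := ∀ (input_grid : List (List Int)),
  Dom_transform input_grid → Pre_transform input_grid →
  Spec_transform input_grid (transform input_grid)

-- ===== LEMMAS AND PROOFS =====

lemma bandsAux_length (ds : List Nat) (prev n : Nat) : (bandsAux ds prev n).length = ds.length + 1 := by
  induction ds generalizing prev with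
  | nil => rfl
  | cons d ds ih => simp [bandsAux, ih]

lemma bandsAux_ub (ds : List Nat) (prev n i : Nat) (hds : ∀ d ∈ ds, d < n)
    (hi : i ≤ ds.length) : ((bandsAux ds prev n).getD i (0, 0)).2 ≤ n := by
  induction ds generalizing prev i with
  | nil => cases Nat.le_zero.mp hi; simp [bandsAux]
  | cons d ds ih =>
    cases i with
    | zero => simpa [bandsAux] using (hds d (by simp)).le
    | succ i =>
      simpa [bandsAux] using ih (d + 1) i (fun e he => hds e (by simp [he])) (by simpa using hi)

lemma band_sum (f : Nat → Nat) : ∀ (ds : List Nat) (prev n i : Nat),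
    List.Pairwise (· < ·) ds → (∀ d ∈ ds, prev ≤ d ∧ d < n) → (∀ d ∈ ds, f d = 0) →
    i ≤ ds.length →
    sumRange f ((bandsAux ds prev n).getD i (0, 0)).1 ((bandsAux ds prev n).getD i (0, 0)).2
      = (((List.range' prev (n - prev)).filter (fun r => decide (bis ds r = i))).map f).sum
  | [], prev, n, i, _, _, _, hi => by
    cases Nat.le_zero.mp hi
    simp [bandsAux, sumRange, bis]
  | d :: ds, prev, n, i, hp, hb, hf, hi => by
    obtain ⟨hpd, hdn⟩ := hb d (by simp)
    have hds : ∀ e ∈ ds, d < e := (List.pairwise_cons.mp hp).1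
    have hsplit : List.range' prev (n - prev)
        = List.range' prev (d + 1 - prev) ++ List.range' (d + 1) (n - (d + 1)) := by
      have h := @List.range'_append prev (d + 1 - prev) (n - (d + 1)) 1
      rw [show prev + 1 * (d + 1 - prev) = d + 1 by omega,
        show (d + 1 - prev) + (n - (d + 1)) = n - prev by omega] at h
      exact h.symm
    have hsplit2 : List.range' prev (d + 1 - prev) = List.range' prev (d - prev) ++ [d] := by
      have h := @List.range'_append prev (d - prev) 1 1
      rw [show prev + 1 * (d - prev) = d by omega,
        show (d - prev) + 1 = d + 1 - prev by omega] at h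
      exact h.symm
    cases i with
    | zero =>
      have hfilter1 : (List.range' prev (d + 1 - prev)).filter (fun r => decide (bis (d :: ds) r = 0))
          = List.range' prev (d + 1 - prev) := by
        apply List.filter_eq_self.mpr
        intro r hr
        have hr' := List.mem_range'_1.mp hr
        have hrd : r ≤ d := by omega
        simp only [bis, List.countP_cons, decide_eq_true_eq]
        have h1 : ¬ (d < r) := by omega
        have h2 : ds.countP (fun e => decide (e < r)) = 0 :=
          List.countP_eq_zero.mpr (fun e he => by have := hds e he; simp; omega)
        simp [h1, h2]
      have hfilter2 : (List.range' (d + 1) (n - (d + 1))).filter (fun r => decide (bis (d :: ds) r = 0)) = [] := by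
        apply List.filter_eq_nil_iff.mpr
        intro r hr
        have hr' := List.mem_range'_1.mp hr
        simp only [bis, List.countP_cons, decide_eq_true_eq]
        have h1 : d < r := by omega
        simp [h1]
      simp only [bandsAux, List.getD_cons_zero]
      rw [hsplit, List.filter_append, hfilter1, hfilter2, List.append_nil,
        hsplit2, List.map_append, List.sum_append]
      simp [sumRange, hf d (by simp)]
    | succ i =>
      have hfilter1 : (List.range' prev (d + 1 - prev)).filter (fun r => decide (bis (d :: ds) r = i + 1)) = [] := by
        apply List.filter_eq_nil_iff.mpr
        intro r hr
        have hr' := List.mem_range'_1.mp hr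
        have hrd : r ≤ d := by omega
        simp only [bis, List.countP_cons, decide_eq_true_eq]
        have h1 : ¬ (d < r) := by omega
        have h2 : ds.countP (fun e => decide (e < r)) = 0 :=
          List.countP_eq_zero.mpr (fun e he => by have := hds e he; simp; omega)
        simp [h1, h2]
      have hfilter2 : (List.range' (d + 1) (n - (d + 1))).filter (fun r => decide (bis (d :: ds) r = i + 1))
          = (List.range' (d + 1) (n - (d + 1))).filter (fun r => decide (bis ds r = i)) := by
        apply List.filter_congr
        intro r hr
        have hr' := List.mem_range'_1.mp hr
        have h1 : d < r := by omega
        simp [bis, h1]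
      simp only [bandsAux, List.getD_cons_succ]
      rw [hsplit, List.filter_append, hfilter1, hfilter2, List.nil_append]
      exact band_sum f ds (d + 1) n i (List.pairwise_cons.mp hp).2
        (fun e he => ⟨hds e he, (hb e (by simp [he])).2⟩)
        (fun e he => hf e (by simp [he])) (by simpa using hi)

def get2 (m : List (List Nat)) (i j : Nat) : Nat := (m.getD i []).getD j 0

def Shape (nr nc : Nat) (m : List (List Nat)) : Prop :=
  m.length = nr ∧ ∀ k < nr, (m.getD k []).length = nc

lemma bump_length (xs : List Nat) (j : Nat) : (bump xs j).length = xs.length := by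
  induction xs generalizing j with
  | nil => rfl
  | cons x xs ih => cases j <;> simp [bump, ih]

lemma bump_getD (xs : List Nat) (j k : Nat) :
    (bump xs j).getD k 0 = xs.getD k 0 + if j = k ∧ k < xs.length then 1 else 0 := by
  induction xs generalizing j k with
  | nil => simp [bump]
  | cons x xs ih =>
    cases j with
    | zero => cases k <;> simp [bump]
    | succ j =>
      cases k with
      | zero => simp [bump]
      | succ k =>
        simp only [bump, List.getD_cons_succ, ih j k, List.length_cons]
        congr 1
        by_cases h1 : j = k
        · by_cases h2 : k < xs.length <;> simp [h1, h2]
        · simp [h1]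

lemma bump2_length (m : List (List Nat)) (i j : Nat) : (bump2 m i j).length = m.length := by
  induction m generalizing i with
  | nil => rfl
  | cons row m ih => cases i <;> simp [bump2, ih]

lemma bump2_rowlen (m : List (List Nat)) (i j k : Nat) :
    ((bump2 m i j).getD k []).length = (m.getD k []).length := by
  induction m generalizing i k with
  | nil => simp [bump2]
  | cons row m ih =>
    cases i with
    | zero => cases k <;> simp [bump2, bump_length]
    | succ i => cases k <;> simp only [bump2, List.getD_cons_zero, List.getD_cons_succ, ih]

lemma bump2_get2 (m : List (List Nat)) (i j i' j' : Nat) :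
    get2 (bump2 m i j) i' j'
      = get2 m i' j' + if i = i' ∧ j = j' ∧ i < m.length ∧ j < (m.getD i []).length then 1 else 0 := by
  induction m generalizing i i' with
  | nil => simp [bump2, get2]
  | cons row m ih =>
    cases i with
    | zero =>
      cases i' with
      | zero =>
        simp only [bump2, get2, List.getD_cons_zero, bump_getD, List.length_cons]
        congr 1
        by_cases h : j = j' <;> simp [h]
      | succ i' => simp [bump2, get2]
    | succ i =>
      cases i' with
      | zero => simp [bump2, get2]
      | succ i' =>
        simp only [bump2, get2, List.getD_cons_succ, List.length_cons] at *
        rw [ih i i']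
        congr 1
        by_cases h1 : i = i'
        · simp [h1]
        · simp [h1]

lemma sum_map_ite_filter (l : List Nat) (p : Nat → Prop) [DecidablePred p] (f : Nat → Nat) :
    (l.map (fun x => if p x then f x else 0)).sum = ((l.filter (fun x => decide (p x))).map f).sum := by
  induction l with
  | nil => rfl
  | cons x l ih => by_cases h : p x <;> simp [h, ih]

lemma inner_fold (g : List (List Int)) (rd cd : List Nat) (r : Nat) :
    ∀ (n : Nat) (m : List (List Nat)), Shape (rd.length + 1) (cd.length + 1) m →
    Shape (rd.length + 1) (cd.length + 1) ((List.range n).foldl (scatterCell g rd cd r) m) ∧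
    ∀ i j, get2 ((List.range n).foldl (scatterCell g rd cd r) m) i j
      = get2 m i j + ((List.range n).map
          (fun c => if cell g r c = 6 ∧ bis rd r = i ∧ bis cd c = j then 1 else 0)).sum := by
  intro n
  induction n with
  | zero => intro m hm; simpa using hm
  | succ n ih =>
    intro m hm
    obtain ⟨hs, hg⟩ := ih m hm
    rw [List.range_succ, List.foldl_append]
    simp only [List.foldl_cons, List.foldl_nil, List.map_append, List.sum_append,
      List.map_cons, List.map_nil, List.sum_cons, List.sum_nil]
    set M := (List.range n).foldl (scatterCell g rd cd r) m with hM
    have hbr : bis rd r < M.length := by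
      rw [hs.1]; exact Nat.lt_succ_of_le List.countP_le_length
    have hbc : ∀ c : Nat, bis cd c < (M.getD (bis rd r) []).length := by
      intro c; rw [hs.2 _ (hs.1 ▸ hbr)]; exact Nat.lt_succ_of_le List.countP_le_length
    unfold scatterCell
    constructor
    · split
      · exact ⟨by rw [bump2_length]; exact hs.1, fun k hk => by rw [bump2_rowlen]; exact hs.2 k hk⟩
      · exact hs
    · intro i j
      by_cases h6 : cell g r n = 6
      · rw [if_pos h6, bump2_get2, hg i j]
        simp only [h6, true_and, hbr, hbc n, and_true]
        omega
      · rw [if_neg h6, hg i j]; simp [h6]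

lemma outer_fold (g : List (List Int)) (rd cd : List Nat) (cols : Nat) :
    ∀ (n : Nat) (m : List (List Nat)), Shape (rd.length + 1) (cd.length + 1) m →
    Shape (rd.length + 1) (cd.length + 1)
      ((List.range n).foldl (fun m r => (List.range cols).foldl (scatterCell g rd cd r) m) m) ∧
    ∀ i j, get2 ((List.range n).foldl (fun m r => (List.range cols).foldl (scatterCell g rd cd r) m) m) i j
      = get2 m i j + ((List.range n).map (fun r => ((List.range cols).map
          (fun c => if cell g r c = 6 ∧ bis rd r = i ∧ bis cd c = j then 1 else 0)).sum)).sum := by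
  intro n
  induction n with
  | zero => intro m hm; simpa using hm
  | succ n ih =>
    intro m hm
    obtain ⟨hs, hg⟩ := ih m hm
    rw [List.range_succ, List.foldl_append]
    simp only [List.foldl_cons, List.foldl_nil, List.map_append, List.sum_append,
      List.map_cons, List.map_nil, List.sum_cons, List.sum_nil]
    obtain ⟨hs', hg'⟩ := inner_fold g rd cd n cols _ hs
    refine ⟨hs', fun i j => ?_⟩
    rw [hg' i j, hg i j]
    omega

lemma getD_replicate_ite {α : Type} (d : α) (n i : Nat) (x : α) :
    (List.replicate n x).getD i d = if i < n then x else d := by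
  split
  · exact List.getD_replicate x (by assumption)
  · rw [List.getD_eq_getElem?_getD, List.getElem?_eq_none (by simp; omega)]; rfl

lemma get2_replicate (a b i j : Nat) : get2 (List.replicate a (List.replicate b 0)) i j = 0 := by
  simp only [get2, getD_replicate_ite]
  split <;> simp

lemma getElem?_eq_some_getD {α : Type} (l : List α) (d : α) (i : Nat) (h : i < l.length) :
    l[i]? = some (l.getD i d) := by
  rw [List.getElem?_eq_getElem h, List.getD_eq_getElem _ _ h]

lemma main_eq (g : List (List Int)) : transform g = transform_alt g := by
  unfold transform transform_alt
  dsimp only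
  set rows := g.length with hrows
  set cols := (g.headD []).length with hcols
  set RD := (List.range rows).filter (fun r => isDivRow g cols r) with hRD
  set CD := (List.range cols).filter (fun c => isDivCol g rows c) with hCD
  have hRDp : List.Pairwise (· < ·) RD := List.pairwise_lt_range.filter _
  have hCDp : List.Pairwise (· < ·) CD := List.pairwise_lt_range.filter _
  have hRDmem : ∀ d ∈ RD, d < rows := fun d hd => List.mem_range.mp (List.mem_of_mem_filter hd)
  have hCDmem : ∀ d ∈ CD, d < cols := fun d hd => List.mem_range.mp (List.mem_of_mem_filter hd)
  have hRD8 : ∀ d ∈ RD, ∀ c < cols, cell g d c = 8 := by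
    intro d hd c hc
    exact eq_of_beq (List.all_eq_true.mp (List.mem_filter.mp hd).2 c (List.mem_range.mpr hc))
  have hCD8 : ∀ d ∈ CD, ∀ r < rows, cell g r d = 8 := by
    intro d hd r hr
    exact eq_of_beq (List.all_eq_true.mp (List.mem_filter.mp hd).2 r (List.mem_range.mpr hr))
  have hinit : Shape (RD.length + 1) (CD.length + 1)
      (List.replicate (RD.length + 1) (List.replicate (CD.length + 1) 0)) :=
    ⟨List.length_replicate, fun k hk => by rw [List.getD_replicate _ hk]; exact List.length_replicate⟩
  obtain ⟨hshape, hget⟩ := outer_fold g RD CD cols rows _ hinit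
  set counts := (List.range rows).foldl (fun m r =>
    (List.range cols).foldl (scatterCell g RD CD r) m)
    (List.replicate (RD.length + 1) (List.replicate (CD.length + 1) 0)) with hcounts
  -- the heart: A's per-band count equals B's scattered count, per output cell
  have key : ∀ i j, i < RD.length + 1 → j < CD.length + 1 →
      sumRange (fun r => sumRange (fun c => if cell g r c = 6 then 1 else 0)
          ((bandsAux CD 0 cols).getD j (0, 0)).1 ((bandsAux CD 0 cols).getD j (0, 0)).2)
        ((bandsAux RD 0 rows).getD i (0, 0)).1 ((bandsAux RD 0 rows).getD i (0, 0)).2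
      = (counts.getD i []).getD j 0 := by
    intro i j hi hj
    have hub : ((bandsAux RD 0 rows).getD i (0, 0)).2 ≤ rows :=
      bandsAux_ub RD 0 rows i hRDmem (by omega)
    -- A side, inner sums: band_sum over the column dividers (for each row r < rows)
    have hA1 : ∀ r < rows,
        sumRange (fun c => if cell g r c = 6 then 1 else 0)
          ((bandsAux CD 0 cols).getD j (0, 0)).1 ((bandsAux CD 0 cols).getD j (0, 0)).2
        = (((List.range' 0 (cols - 0)).filter (fun c => decide (bis CD c = j))).map
            (fun c => if cell g r c = 6 then 1 else 0)).sum := by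
      intro r hr
      exact band_sum _ CD 0 cols j hCDp (fun d hd => ⟨Nat.zero_le _, hCDmem d hd⟩)
        (fun d hd => by simp [hCD8 d hd r hr]) (by omega)
    -- A side, outer sum: band_sum over the row dividers
    have hA2 := band_sum (fun r => (((List.range' 0 (cols - 0)).filter
          (fun c => decide (bis CD c = j))).map (fun c => if cell g r c = 6 then 1 else 0)).sum)
        RD 0 rows i hRDp (fun d hd => ⟨Nat.zero_le _, hRDmem d hd⟩)
        (fun d hd => List.sum_eq_zero (fun x hx => by
          obtain ⟨c, hc, rfl⟩ := List.mem_map.mp hx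
          have hc' := List.mem_range'_1.mp (List.mem_of_mem_filter hc)
          simp [hRD8 d hd c (by omega)])) (by omega)
    -- B side: fold characterisation, then reshape the double sum
    have hB : (counts.getD i []).getD j 0
        = ((List.range rows).map (fun r => ((List.range cols).map
            (fun c => if cell g r c = 6 ∧ bis RD r = i ∧ bis CD c = j then 1 else 0)).sum)).sum := by
      have := hget i j
      rw [get2_replicate] at this
      simpa [get2] using this
    have hstep : ∀ r, ((List.range cols).map
          (fun c => if cell g r c = 6 ∧ bis RD r = i ∧ bis CD c = j then 1 else 0)).sum
        = if bis RD r = i then (((List.range cols).filter (fun c => decide (bis CD c = j))).map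
            (fun c => if cell g r c = 6 then 1 else 0)).sum else 0 := by
      intro r
      by_cases hbr : bis RD r = i
      · rw [if_pos hbr, ← sum_map_ite_filter]
        exact congrArg List.sum (List.map_congr_left (fun c _ => by
          by_cases h1 : bis CD c = j <;> by_cases h2 : cell g r c = 6 <;> simp [h1, h2, hbr]))
      · rw [if_neg hbr]
        exact List.sum_eq_zero (fun x hx => by
          obtain ⟨c, _, rfl⟩ := List.mem_map.mp hx; simp [hbr])
    calc sumRange (fun r => sumRange (fun c => if cell g r c = 6 then 1 else 0)
            ((bandsAux CD 0 cols).getD j (0, 0)).1 ((bandsAux CD 0 cols).getD j (0, 0)).2)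
          ((bandsAux RD 0 rows).getD i (0, 0)).1 ((bandsAux RD 0 rows).getD i (0, 0)).2
        = sumRange (fun r => (((List.range' 0 (cols - 0)).filter
            (fun c => decide (bis CD c = j))).map (fun c => if cell g r c = 6 then 1 else 0)).sum)
            ((bandsAux RD 0 rows).getD i (0, 0)).1 ((bandsAux RD 0 rows).getD i (0, 0)).2 := by
          unfold sumRange
          exact congrArg List.sum (List.map_congr_left (fun r hr => by
            have := List.mem_range'_1.mp hr
            exact hA1 r (by omega)))
      _ = (((List.range' 0 (rows - 0)).filter (fun r => decide (bis RD r = i))).map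
            (fun r => (((List.range' 0 (cols - 0)).filter (fun c => decide (bis CD c = j))).map
              (fun c => if cell g r c = 6 then 1 else 0)).sum)).sum := hA2
      _ = ((List.range rows).map (fun r => if bis RD r = i then
            (((List.range cols).filter (fun c => decide (bis CD c = j))).map
              (fun c => if cell g r c = 6 then 1 else 0)).sum else 0)).sum := by
          rw [← sum_map_ite_filter]
          simp only [Nat.sub_zero, ← List.range_eq_range']
      _ = (counts.getD i []).getD j 0 := by
          rw [hB]
          exact congrArg List.sum (List.map_congr_left (fun r _ => (hstep r).symm))
  -- assemble the two matrices entry by entry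
  apply List.ext_getElem?
  intro i
  simp only [List.getElem?_map]
  rcases Nat.lt_or_ge i (RD.length + 1) with hi | hi
  · rw [getElem?_eq_some_getD (bandsAux RD 0 rows) (0, 0) i (by rwa [bandsAux_length]),
      getElem?_eq_some_getD counts [] i (by rwa [hshape.1])]
    simp only [Option.map_some]
    congr 1
    have hlen_ci : (counts.getD i []).length = CD.length + 1 := hshape.2 i hi
    apply List.ext_getElem?
    intro j
    simp only [List.getElem?_map]
    rcases Nat.lt_or_ge j (CD.length + 1) with hj | hj
    · rw [getElem?_eq_some_getD (bandsAux CD 0 cols) (0, 0) j (by rwa [bandsAux_length]),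
        getElem?_eq_some_getD (counts.getD i []) 0 j (by rwa [hlen_ci])]
      simp only [Option.map_some]
      rw [key i j hi hj]
    · rw [List.getElem?_eq_none (by rwa [bandsAux_length]),
        List.getElem?_eq_none (by rwa [hlen_ci])]
      simp
  · rw [List.getElem?_eq_none (by rwa [bandsAux_length]),
      List.getElem?_eq_none (by rwa [hshape.1])]
    simp

-- ===== VERDICT (by name: the statement is the Claim_ definition above) =====
theorem transform_spec : Claim_equal_transform := by
  intro g _ _
  unfold Spec_transform
  exact main_eq g
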